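-- pv_equiv track=rewrite | github.com/zhuobichen/AutoResearch_PM25FusionMethod | PaperDownloadMd/classify_all_papers.py | score_paper
-- ===== SOURCE A (Python) =====
-- def score_paper(filename):
--     """根据文件名打分"""
--     filename_lower = filename.lower()
--
--     # 5分：直接相关
--     if all(kw in filename_lower for kw in ['pm2.5', 'cmaq']):
--         return 5
--     if all(kw in filename_lower for kw in ['pm2.5', 'downscaling']):
--         return 5
--     if all(kw in filename_lower for kw in ['pm2.5', 'kriging']):
--         return 5
--     if all(kw in filename_lower for kw in ['pm2.5', 'fusion']):
--         return 5
--     if all(kw in filename_lower for kw in ['pm2.5', 'spatiotemporal']):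
--         return 5
--
--     # 4分：高度相关
--     if 'pm2.5' in filename_lower:
--         return 4
--     if 'air quality' in filename_lower:
--         return 4
--     if 'cmaq' in filename_lower:
--         return 4
--     if 'downscaling' in filename_lower:
--         return 4
--     if 'kriging' in filename_lower:
--         return 4
--     if 'aerosol' in filename_lower:
--         return 4
--
--     # 3分：部分相关
--     if any(kw in filename_lower for kw in ['spatial', 'temporal', 'prediction', 'machine learning', 'neural', 'deep learning']):
--         return 3
--     if any(kw in filename_lower for kw in ['pollution', 'atmospheric', 'weather']):
--         return 3
--
--     return 2  # 不相关
-- ===== SOURCE B (Python) =====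
-- WEIGHTS = {
--     'pm2.5': 4, 'air quality': 4, 'cmaq': 4, 'downscaling': 4, 'kriging': 4, 'aerosol': 4,
--     'spatial': 3, 'temporal': 3, 'prediction': 3, 'machine learning': 3, 'neural': 3,
--     'deep learning': 3, 'pollution': 3, 'atmospheric': 3, 'weather': 3,
-- }
-- COMBO = ('cmaq', 'downscaling', 'kriging', 'fusion', 'spatiotemporal')
--
--
-- def score_paper(filename):
--     """根据文件名打分"""
--     fl = filename.lower()
--     if 'pm2.5' in fl and any(k in fl for k in COMBO):
--         return 5
--     return max((w for k, w in WEIGHTS.items() if k in fl), default=2)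
-- ===== Notes on version B (the rewrite author's own statement) =====
-- stated objective: simpler
-- what changed: Replaced the first-match if/return chain by a weight map: the score is the maximum weight of any keyword found (default 2), with one special case returning 5 when pm2.5 co-occurs with a combo keyword; correct because the chain's equal-score branches are order-insensitive.
import Mathlib
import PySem

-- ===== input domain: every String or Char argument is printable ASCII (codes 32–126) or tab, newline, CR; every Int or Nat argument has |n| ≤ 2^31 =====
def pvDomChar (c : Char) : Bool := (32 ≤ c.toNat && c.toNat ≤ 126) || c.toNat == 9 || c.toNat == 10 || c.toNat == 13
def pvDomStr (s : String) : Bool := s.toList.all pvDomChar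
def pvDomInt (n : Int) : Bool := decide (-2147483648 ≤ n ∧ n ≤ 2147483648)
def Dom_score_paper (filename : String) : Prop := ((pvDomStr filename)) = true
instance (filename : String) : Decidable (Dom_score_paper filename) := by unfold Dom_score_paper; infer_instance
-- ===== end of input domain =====

-- B replaces A's first-match if/return chain by a keyword→weight map whose maximum matched
-- weight (default 2) is the score, plus one pm2.5+combo rule returning 5 (simpler; same cost).

-- ===== PORT A =====
def score_paper (filename : String) : Int :=
  let filename_lower := PySem.Str.lower filename
  if ["pm2.5", "cmaq"].all (fun kw => PySem.Str.isIn kw filename_lower) then 5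
  else if ["pm2.5", "downscaling"].all (fun kw => PySem.Str.isIn kw filename_lower) then 5
  else if ["pm2.5", "kriging"].all (fun kw => PySem.Str.isIn kw filename_lower) then 5
  else if ["pm2.5", "fusion"].all (fun kw => PySem.Str.isIn kw filename_lower) then 5
  else if ["pm2.5", "spatiotemporal"].all (fun kw => PySem.Str.isIn kw filename_lower) then 5
  else if PySem.Str.isIn "pm2.5" filename_lower then 4
  else if PySem.Str.isIn "air quality" filename_lower then 4
  else if PySem.Str.isIn "cmaq" filename_lower then 4
  else if PySem.Str.isIn "downscaling" filename_lower then 4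
  else if PySem.Str.isIn "kriging" filename_lower then 4
  else if PySem.Str.isIn "aerosol" filename_lower then 4
  else if ["spatial", "temporal", "prediction", "machine learning", "neural", "deep learning"].any
      (fun kw => PySem.Str.isIn kw filename_lower) then 3
  else if ["pollution", "atmospheric", "weather"].any (fun kw => PySem.Str.isIn kw filename_lower) then 3
  else 2

-- ===== PORT B =====
-- the WEIGHTS dict (insertion order) and the COMBO tuple from Source B
def pvWeights : List (String × Int) :=
  [ ("pm2.5", 4), ("air quality", 4), ("cmaq", 4), ("downscaling", 4), ("kriging", 4), ("aerosol", 4)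
  , ("spatial", 3), ("temporal", 3), ("prediction", 3), ("machine learning", 3), ("neural", 3)
  , ("deep learning", 3), ("pollution", 3), ("atmospheric", 3), ("weather", 3) ]

def pvCombo : List String := ["cmaq", "downscaling", "kriging", "fusion", "spatiotemporal"]

def score_paper_alt (filename : String) : Int :=
  let fl := PySem.Str.lower filename
  if PySem.Str.isIn "pm2.5" fl && pvCombo.any (fun k => PySem.Str.isIn k fl) then 5
  else -- max(weights of matched keywords, default=2)
    ((pvWeights.filter (fun p => PySem.Str.isIn p.1 fl)).map Prod.snd).foldl max 2

-- ===== PRECONDITION & SPEC =====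
def Spec_score_paper (filename : String) (out : Int) : Prop := out = score_paper_alt filename
instance (filename : String) (out : Int) : Decidable (Spec_score_paper filename out) := by unfold Spec_score_paper; infer_instance

-- ===== CLAIM (what is proved, stated in full; the proofs are below) =====
def Claim_equal_score_paper : Prop := ∀ (filename : String), Dom_score_paper filename → Spec_score_paper filename (score_paper filename)

-- ===== LEMMAS AND PROOFS =====

-- folding max over the weights of the matched keywords of one constant-weight block
lemma foldMaxConst (fl : String) (c : Int) (ks : List String) (m : Int) :
    (((ks.map (fun k => (k, c))).filter (fun p => PySem.Str.isIn p.1 fl)).map Prod.snd).foldl max m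
    = if ks.any (fun k => PySem.Str.isIn k fl) then max m c else m := by
  induction ks generalizing m with
  | nil => simp
  | cons k t ih =>
    simp only [List.map_cons, List.filter_cons, List.any_cons, Bool.or_eq_true]
    by_cases h : PySem.Str.isIn k fl
    · simp only [h, List.map_cons, List.foldl_cons, ih, true_or, if_pos]
      split
      · rw [max_assoc, max_self]
      · rfl
    · simp only [h, if_false, ih, Bool.false_eq_true, false_or]

-- ===== VERDICT (by name: the statement is the Claim_ definition above) =====
theorem score_paper_spec : Claim_equal_score_paper := by
  intro filename _
  unfold Spec_score_paper score_paper score_paper_alt pvCombo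
  have hw : pvWeights
      = ((["pm2.5", "air quality", "cmaq", "downscaling", "kriging", "aerosol"].map
            (fun k => (k, (4 : Int))))
        ++ (["spatial", "temporal", "prediction", "machine learning", "neural", "deep learning",
             "pollution", "atmospheric", "weather"].map (fun k => (k, (3 : Int))))) := rfl
  rw [hw]
  simp only [List.filter_append, List.map_append, List.foldl_append, foldMaxConst,
    List.all_cons, List.all_nil, List.any_cons, List.any_nil,
    Bool.and_true, Bool.or_false]
  generalize PySem.Str.isIn "pm2.5" (PySem.Str.lower filename) = b1
  generalize PySem.Str.isIn "cmaq" (PySem.Str.lower filename) = b2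
  generalize PySem.Str.isIn "downscaling" (PySem.Str.lower filename) = b3
  generalize PySem.Str.isIn "kriging" (PySem.Str.lower filename) = b4
  generalize PySem.Str.isIn "fusion" (PySem.Str.lower filename) = b5
  generalize PySem.Str.isIn "spatiotemporal" (PySem.Str.lower filename) = b6
  generalize PySem.Str.isIn "air quality" (PySem.Str.lower filename) = b7
  generalize PySem.Str.isIn "aerosol" (PySem.Str.lower filename) = b8
  generalize PySem.Str.isIn "spatial" (PySem.Str.lower filename) = b9
  generalize PySem.Str.isIn "temporal" (PySem.Str.lower filename) = b10
  generalize PySem.Str.isIn "prediction" (PySem.Str.lower filename) = b11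
  generalize PySem.Str.isIn "machine learning" (PySem.Str.lower filename) = b12
  generalize PySem.Str.isIn "neural" (PySem.Str.lower filename) = b13
  generalize PySem.Str.isIn "deep learning" (PySem.Str.lower filename) = b14
  generalize PySem.Str.isIn "pollution" (PySem.Str.lower filename) = b15
  generalize PySem.Str.isIn "atmospheric" (PySem.Str.lower filename) = b16
  generalize PySem.Str.isIn "weather" (PySem.Str.lower filename) = b17
  cases b1 <;> cases b7 <;> cases b2 <;> cases b3 <;> cases b4 <;> cases b8 <;>
    cases b5 <;> cases b6 <;> simp <;>
    cases b9 <;> cases b10 <;> cases b11 <;> cases b12 <;> cases b13 <;> cases b14 <;>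
    cases b15 <;> cases b16 <;> cases b17 <;> simp
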